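-- pv_equiv track=rewrite | github.com/dimk00z/grokking_algorithms | 9_dynamic_programming.py | get_memtable
-- ===== SOURCE A (Python) =====
-- def get_memtable(area, value, capacity):
--     size = len(value)
--     table = [
--         [0 for _ in range(capacity+1)]
--         for _ in range(size+1)]
--     for x in range(size+1):
--         for y in range(capacity+1):
--             if not x or not y:
--                 table[x][y] = 0
--             elif area[x-1] <= y:
--                 table[x][y] = max(value[x-1] + table[x-1][y-area[x-1]],
--                                   table[x-1][y])
--             else:
--                 table[x][y] = table[x-1][y]
--     return table
-- ===== SOURCE B (Python) =====
-- def get_memtable(area, value, capacity):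
--     # Top-down memoized recursion: cell(x, y) computes one entry via the
--     # recurrence, caching results in the table; the loops just query every cell.
--     size = len(value)
--     table = [[None] * (capacity + 1) for _ in range(size + 1)]
--
--     def cell(x, y):
--         r = table[x][y]
--         if r is None:
--             if x == 0 or y == 0:
--                 r = 0
--             elif area[x - 1] <= y:
--                 r = max(value[x - 1] + cell(x - 1, y - area[x - 1]),
--                         cell(x - 1, y))
--             else:
--                 r = cell(x - 1, y)
--             table[x][y] = r
--         return r
--
--     for x in range(size + 1):
--         for y in range(capacity + 1):
--             cell(x, y)
--     return table
-- ===== Notes on version B (the rewrite author's own statement) =====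
-- stated objective: alternative
-- what changed: Replaces A's bottom-up table fill (nested index loops writing each cell from the previous row) by top-down memoized recursion: a recursive cell(x,y) implements the recurrence, caching each result in the table, and the loops merely query every coordinate.
import Mathlib
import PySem

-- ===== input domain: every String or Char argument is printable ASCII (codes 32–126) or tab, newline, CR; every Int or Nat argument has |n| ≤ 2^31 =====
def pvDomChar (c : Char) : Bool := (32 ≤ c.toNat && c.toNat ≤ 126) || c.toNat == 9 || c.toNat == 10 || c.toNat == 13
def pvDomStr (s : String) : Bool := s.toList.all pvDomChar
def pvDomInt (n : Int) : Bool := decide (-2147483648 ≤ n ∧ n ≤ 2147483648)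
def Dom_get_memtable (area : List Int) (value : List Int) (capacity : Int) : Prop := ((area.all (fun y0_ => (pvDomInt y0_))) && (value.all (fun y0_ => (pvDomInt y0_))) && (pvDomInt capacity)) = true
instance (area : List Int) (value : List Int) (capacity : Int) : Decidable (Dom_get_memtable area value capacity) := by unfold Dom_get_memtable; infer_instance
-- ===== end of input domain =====

-- B replaces A's bottom-up nested-loop table fill by top-down memoized recursion on the same
-- recurrence: a recursive cell(x,y) caching each result in the table, the loops only querying
-- every coordinate; same cost, different decomposition.

-- ===== PORT A =====
def get_memtable (area : List Int) (value : List Int) (capacity : Int) : List (List Int) :=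
  let size : Int := PySem.List.len value
  let table : List (List Int) :=
    (PySem.List.pyRange 0 (size+1) 1).map (fun _ =>
      (PySem.List.pyRange 0 (capacity+1) 1).map (fun _ => (0:Int)))
  (PySem.List.pyRange 0 (size+1) 1).foldl (fun table x =>
    (PySem.List.pyRange 0 (capacity+1) 1).foldl (fun table y =>
      let cell : Int :=
        if x = 0 ∨ y = 0 then 0
        else
          -- area[x-1], value[x-1], table[x-1][…]: in range on every input Pre_ admits
          let a := PySem.List.pyGetD area (x-1) 0
          if a ≤ y then
            max (PySem.List.pyGetD value (x-1) 0
                  + PySem.List.pyGetD (PySem.List.pyGetD table (x-1) []) (y - a) 0)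
                (PySem.List.pyGetD (PySem.List.pyGetD table (x-1) []) y 0)
          else PySem.List.pyGetD (PySem.List.pyGetD table (x-1) []) y 0
      PySem.List.pySetD table x (PySem.List.pySetD (PySem.List.pyGetD table x []) y cell))
      table)
    table

-- ===== PORT B =====
-- cell(x, y): memo lookup in the table (None = not yet computed), else recurse on x-1 per the
-- recurrence and write the result back. x ranges over range(size+1), hence Nat.
-- area[x-1] / value[x-1] / table[_][_] as pyGetD/pySetD: in range on every input Pre_ admits.
def pvCellB (area : List Int) (value : List Int) (x : Nat) (y : Int)
    (t : List (List (Option Int))) : Int × List (List (Option Int)) :=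
  match PySem.List.pyGetD (PySem.List.pyGetD t (x:Int) []) y none with
  | some r => (r, t)
  | none =>
    let rt : Int × List (List (Option Int)) :=
      match x with
      | 0 => ((0:Int), t)
      | k+1 =>
        if y = 0 then ((0:Int), t)
        else if PySem.List.pyGetD area (k:Int) 0 ≤ y then
          let p1 := pvCellB area value k (y - PySem.List.pyGetD area (k:Int) 0) t
          let p2 := pvCellB area value k y p1.2
          (max (PySem.List.pyGetD value (k:Int) 0 + p1.1) p2.1, p2.2)
        else pvCellB area value k y t
    (rt.1, PySem.List.pySetD rt.2 (x:Int)
      (PySem.List.pySetD (PySem.List.pyGetD rt.2 (x:Int) []) y (some rt.1)))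

def get_memtable_alt (area : List Int) (value : List Int) (capacity : Int) : List (List Int) :=
  let size := value.length
  -- table = [[None] * (capacity + 1) for _ in range(size + 1)]
  let t0 : List (List (Option Int)) :=
    (List.range (size+1)).map (fun _ => PySem.List.pyRepeat [(none : Option Int)] (capacity+1))
  -- for x in range(size + 1): for y in range(capacity + 1): cell(x, y)
  let t := (List.range (size+1)).foldl (fun t x =>
    (PySem.List.pyRange 0 (capacity+1) 1).foldl (fun t y => (pvCellB area value x y t).2) t) t0
  -- return table: after the fill every entry is an int (some _); unwrap the Option
  t.map (fun row => row.map (fun o => o.getD 0))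

-- ===== PRECONDITION & SPEC =====
-- Pre_ excludes exactly the inputs on which Python A raises IndexError (it returns on all others):
-- with capacity ≥ 1, an area shorter than value (area[x-1] out of range) or a negative area entry
-- among the first len(value) (y - area[x-1] exceeds the row) makes A raise.
def Pre_get_memtable (area : List Int) (value : List Int) (capacity : Int) : Prop :=
  capacity ≤ 0 ∨ (value.length ≤ area.length ∧ ∀ a ∈ area.take value.length, 0 ≤ a)
instance (area : List Int) (value : List Int) (capacity : Int) : Decidable (Pre_get_memtable area value capacity) := by unfold Pre_get_memtable; infer_instance

def pvWitness_get_memtable : List Int × List Int × Int := ([2, 3, 1], [3, 4, 2], 5)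

def Spec_get_memtable (area : List Int) (value : List Int) (capacity : Int) (out : List (List Int)) : Prop := out = get_memtable_alt area value capacity
instance (area : List Int) (value : List Int) (capacity : Int) (out : List (List Int)) : Decidable (Spec_get_memtable area value capacity out) := by unfold Spec_get_memtable; infer_instance

-- ===== CLAIM (what is proved, stated in full; the proofs are below) =====
def Claim_equal_get_memtable : Prop := ∀ (area : List Int) (value : List Int) (capacity : Int), Dom_get_memtable area value capacity → Pre_get_memtable area value capacity → Spec_get_memtable area value capacity (get_memtable area value capacity)

-- ===== LEMMAS AND PROOFS =====

-- the mathematical recurrence both programs compute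
def pvSpec (area : List Int) (value : List Int) : Nat → Int → Int
  | 0, _ => 0
  | k+1, y =>
    if y = 0 then 0
    else if area.getD k 0 ≤ y then
      max (value.getD k 0 + pvSpec area value k (y - area.getD k 0)) (pvSpec area value k y)
    else pvSpec area value k y

-- ---- B-side: the memoized recursion computes pvSpec ----

-- the table entry at coordinates (i, j)
def pvE (t : List (List (Option Int))) (i j : Nat) : Option Int := (t.getD i []).getD j none

-- the table keeps its (size+1) × (capacity+1) shape
def pvShapeB (value : List Int) (cap : Int) (t : List (List (Option Int))) : Prop :=
  t.length = value.length + 1 ∧ ∀ i : Nat, i < t.length → (t.getD i []).length = (cap+1).toNat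

-- every filled entry holds the spec value of its coordinates
def pvInvB (area value : List Int) (t : List (List (Option Int))) : Prop :=
  ∀ (i j : Nat) (r : Int), pvE t i j = some r → r = pvSpec area value i (j:Int)

theorem pv_lookup (t : List (List (Option Int))) (x : Nat) (y : Int) (hy : 0 ≤ y) :
    PySem.List.pyGetD (PySem.List.pyGetD t ((x:Nat):Int) []) y none = pvE t x y.toNat := by
  rw [PySem.List.pyGetD_natCast, PySem.List.pyGetD_of_nonneg _ _ hy]
  rfl

theorem pv_write_eq (t : List (List (Option Int))) (x : Nat) (y : Int) (hy : 0 ≤ y) (r : Int) :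
    PySem.List.pySetD t ((x:Nat):Int)
        (PySem.List.pySetD (PySem.List.pyGetD t ((x:Nat):Int) []) y (some r))
      = t.set x ((t.getD x []).set y.toNat (some r)) := by
  rw [PySem.List.pySetD_natCast, PySem.List.pyGetD_natCast, PySem.List.pySetD_of_nonneg _ _ hy]

theorem pv_getD_set_row (t : List (List (Option Int))) (x i : Nat)
    (v : List (Option Int)) (hx : x < t.length) :
    (t.set x v).getD i [] = if i = x then v else t.getD i [] := by
  rw [List.getD_eq_getElem?_getD, List.getD_eq_getElem?_getD, List.getElem?_set]
  rcases eq_or_ne i x with h | h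
  · rw [if_pos h.symm, if_pos (h ▸ hx), if_pos h]
    rfl
  · rw [if_neg (Ne.symm h), if_neg h]

theorem pv_write_props (value : List Int) (cap : Int) (t : List (List (Option Int)))
    (x : Nat) (y : Int) (hy0 : 0 ≤ y) (hy1 : y < cap + 1)
    (hx : x < t.length) (hs : pvShapeB value cap t) (r : Int) :
    pvShapeB value cap (t.set x ((t.getD x []).set y.toNat (some r)))
    ∧ (∀ i j : Nat, ¬ (i = x ∧ j = y.toNat) →
        pvE (t.set x ((t.getD x []).set y.toNat (some r))) i j = pvE t i j)
    ∧ pvE (t.set x ((t.getD x []).set y.toNat (some r))) x y.toNat = some r := by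
  have hrowlen : (t.getD x []).length = (cap+1).toNat := hs.2 x hx
  have hylt : y.toNat < (t.getD x []).length := by omega
  refine ⟨⟨by rw [List.length_set, hs.1], ?_⟩, ?_, ?_⟩
  · intro i hi
    rw [List.length_set] at hi
    rw [pv_getD_set_row t x i _ hx]
    rcases eq_or_ne i x with h | h
    · rw [if_pos h, List.length_set]
      exact hrowlen
    · rw [if_neg h]
      exact hs.2 i hi
  · intro i j hij
    unfold pvE
    rw [pv_getD_set_row t x i _ hx]
    rcases eq_or_ne i x with h | h
    · subst h
      rw [if_pos rfl]
      have hj : j ≠ y.toNat := fun hc => hij ⟨rfl, hc⟩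
      rw [List.getD_eq_getElem?_getD, List.getD_eq_getElem?_getD,
        List.getElem?_set, if_neg (fun hc => hj hc.symm), ← List.getD_eq_getElem?_getD]
    · rw [if_neg h]
  · unfold pvE
    rw [pv_getD_set_row t x x _ hx, if_pos rfl, List.getD_eq_getElem?_getD,
      List.getElem?_set, if_pos rfl, if_pos hylt]
    rfl

-- one-step unfolding lemmas for the memoized cell function
theorem pvCellB_hit (area value : List Int) (x : Nat) (y r : Int) (t : List (List (Option Int)))
    (h : PySem.List.pyGetD (PySem.List.pyGetD t ((x:Nat):Int) []) y none = some r) :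
    pvCellB area value x y t = (r, t) := by
  rw [pvCellB.eq_def, h]

theorem pvCellB_zero (area value : List Int) (y : Int) (t : List (List (Option Int)))
    (h : PySem.List.pyGetD (PySem.List.pyGetD t ((0:Nat):Int) []) y none = none) :
    pvCellB area value 0 y t
      = (0, PySem.List.pySetD t ((0:Nat):Int)
          (PySem.List.pySetD (PySem.List.pyGetD t ((0:Nat):Int) []) y (some 0))) := by
  rw [pvCellB.eq_def]
  simp only [Nat.cast_zero] at h ⊢
  rw [h]

theorem pvCellB_y0 (area value : List Int) (k : Nat) (t : List (List (Option Int)))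
    (h : PySem.List.pyGetD (PySem.List.pyGetD t ((k+1:Nat):Int) []) (0:Int) none = none) :
    pvCellB area value (k+1) 0 t
      = (0, PySem.List.pySetD t ((k+1:Nat):Int)
          (PySem.List.pySetD (PySem.List.pyGetD t ((k+1:Nat):Int) []) 0 (some 0))) := by
  rw [pvCellB.eq_def, h]
  rfl

theorem pvCellB_take (area value : List Int) (k : Nat) (y : Int) (t : List (List (Option Int)))
    (h : PySem.List.pyGetD (PySem.List.pyGetD t ((k+1:Nat):Int) []) y none = none) (hy : y ≠ 0)
    (ha : PySem.List.pyGetD area (k:Int) 0 ≤ y) :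
    pvCellB area value (k+1) y t =
      let p1 := pvCellB area value k (y - PySem.List.pyGetD area (k:Int) 0) t
      let p2 := pvCellB area value k y p1.2
      let r := max (PySem.List.pyGetD value (k:Int) 0 + p1.1) p2.1
      (r, PySem.List.pySetD p2.2 ((k+1:Nat):Int)
        (PySem.List.pySetD (PySem.List.pyGetD p2.2 ((k+1:Nat):Int) []) y (some r))) := by
  rw [pvCellB.eq_def, h]
  simp only [if_neg hy, if_pos ha]

theorem pvCellB_skip (area value : List Int) (k : Nat) (y : Int) (t : List (List (Option Int)))
    (h : PySem.List.pyGetD (PySem.List.pyGetD t ((k+1:Nat):Int) []) y none = none) (hy : y ≠ 0)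
    (ha : ¬ PySem.List.pyGetD area (k:Int) 0 ≤ y) :
    pvCellB area value (k+1) y t =
      let p := pvCellB area value k y t
      (p.1, PySem.List.pySetD p.2 ((k+1:Nat):Int)
        (PySem.List.pySetD (PySem.List.pyGetD p.2 ((k+1:Nat):Int) []) y (some p.1))) := by
  rw [pvCellB.eq_def, h]
  simp only [if_neg hy, if_neg ha]

-- a used area entry is nonnegative under Pre_ (or out of range, defaulting to 0)
theorem pv_area_nonneg (area value : List Int)
    (harea : ∀ a ∈ area.take value.length, 0 ≤ a) (k : Nat) (hk : k < value.length) :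
    0 ≤ area.getD k 0 := by
  by_cases hkl : k < area.length
  · refine harea _ ?_
    rw [List.getD_eq_getElem?_getD, List.getElem?_eq_getElem hkl]
    exact List.mem_take_iff_getElem.mpr ⟨k, by omega, by simp⟩
  · rw [List.getD_eq_getElem?_getD, List.getElem?_eq_none (by omega)]; rfl

-- the main invariant of the memoized recursion: under Pre_'s area condition, cell(x, y)
-- returns the spec value, keeps shape and invariant, never changes a filled entry, and
-- leaves its own entry filled
theorem pv_cell_main (area value : List Int) (cap : Int)
    (harea : 0 < cap → ∀ a ∈ area.take value.length, 0 ≤ a) :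
    ∀ (x : Nat), x ≤ value.length → ∀ (y : Int) (t : List (List (Option Int))),
      0 ≤ y → y < cap + 1 → pvShapeB value cap t → pvInvB area value t →
      (pvCellB area value x y t).1 = pvSpec area value x y
      ∧ pvShapeB value cap (pvCellB area value x y t).2
      ∧ pvInvB area value (pvCellB area value x y t).2
      ∧ (∀ i j : Nat, (pvE t i j).isSome →
          pvE (pvCellB area value x y t).2 i j = pvE t i j)
      ∧ pvE (pvCellB area value x y t).2 x y.toNat = some (pvSpec area value x y) := by
  intro x
  induction x with
  | zero =>
    intro _ y t hy0 hy1 hs hi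
    cases hmy : PySem.List.pyGetD (PySem.List.pyGetD t ((0:Nat):Int) []) y none with
    | some r =>
      rw [pvCellB_hit area value 0 y r t hmy]
      rw [pv_lookup t 0 y hy0] at hmy
      have hr : r = pvSpec area value 0 (y.toNat : Int) := hi 0 y.toNat r hmy
      exact ⟨by rw [hr]; rfl, hs, hi, fun _ _ _ => rfl, by rw [hmy, hr]; rfl⟩
    | none =>
      rw [pvCellB_zero area value y t hmy, pv_write_eq t 0 y hy0 0]
      have hx0 : (0:Nat) < t.length := by rw [hs.1]; omega
      obtain ⟨hs', hpres, hself⟩ := pv_write_props value cap t 0 y hy0 hy1 hx0 hs (0:Int)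
      rw [pv_lookup t 0 y hy0] at hmy
      refine ⟨rfl, hs', ?_, ?_, by rw [hself]; rfl⟩
      · intro i j r h
        by_cases hc : i = 0 ∧ j = y.toNat
        · obtain ⟨h1, h2⟩ := hc
          subst h1; subst h2
          rw [hself] at h
          cases h
          rfl
        · rw [hpres i j hc] at h
          exact hi i j r h
      · intro i j hsome
        refine hpres i j ?_
        rintro ⟨h1, h2⟩
        subst h1; subst h2
        rw [hmy] at hsome
        simp at hsome
  | succ k ih =>
    intro hxle y t hy0 hy1 hs hi
    cases hmy : PySem.List.pyGetD (PySem.List.pyGetD t ((k+1:Nat):Int) []) y none with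
    | some r =>
      rw [pvCellB_hit area value (k+1) y r t hmy]
      rw [pv_lookup t (k+1) y hy0] at hmy
      have hr : r = pvSpec area value (k+1) (y.toNat : Int) := hi (k+1) y.toNat r hmy
      have hyy : ((y.toNat : Nat) : Int) = y := by omega
      refine ⟨by rw [hr, hyy], hs, hi, fun _ _ _ => rfl, by rw [hmy, hr, hyy]⟩
    | none =>
      by_cases hy : y = 0
      · subst hy
        rw [pvCellB_y0 area value k t hmy, pv_write_eq t (k+1) 0 le_rfl 0]
        have hxk : (k+1:Nat) < t.length := by rw [hs.1]; omega
        obtain ⟨hs', hpres, hself⟩ := pv_write_props value cap t (k+1) 0 le_rfl hy1 hxk hs (0:Int)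
        rw [pv_lookup t (k+1) 0 le_rfl] at hmy
        have hspec0 : pvSpec area value (k+1) 0 = 0 := by simp [pvSpec]
        refine ⟨by rw [hspec0], hs', ?_, ?_, by rw [hself, hspec0]⟩
        · intro i j r h
          by_cases hc : i = k+1 ∧ j = (0:Int).toNat
          · obtain ⟨h1, h2⟩ := hc
            subst h1; subst h2
            rw [hself] at h
            cases h
            simp [pvSpec]
          · rw [hpres i j hc] at h
            exact hi i j r h
        · intro i j hsome
          refine hpres i j ?_
          rintro ⟨h1, h2⟩
          subst h1; subst h2
          rw [hmy] at hsome
          simp at hsome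
      · have hcap : 0 < cap := by omega
        have ha0 : 0 ≤ area.getD k 0 :=
          pv_area_nonneg area value (harea hcap) k (by omega)
        by_cases ha : PySem.List.pyGetD area (k:Int) 0 ≤ y
        · simp only [pvCellB_take area value k y t hmy hy ha]
          have haInt : area.getD k 0 ≤ y := by
            rwa [PySem.List.pyGetD_natCast] at ha
          obtain ⟨h11, hs1, hi1, hp1, _⟩ :=
            ih (by omega) (y - PySem.List.pyGetD area (k:Int) 0) t
              (by rw [PySem.List.pyGetD_natCast]; omega)
              (by rw [PySem.List.pyGetD_natCast]; omega) hs hi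
          obtain ⟨h21, hs2, hi2, hp2, _⟩ :=
            ih (by omega) y _ hy0 hy1 hs1 hi1
          set t2 := (pvCellB area value k y
            (pvCellB area value k (y - PySem.List.pyGetD area (k:Int) 0) t).2).2 with ht2
          set r := max (PySem.List.pyGetD value (k:Int) 0
              + (pvCellB area value k (y - PySem.List.pyGetD area (k:Int) 0) t).1)
            (pvCellB area value k y
              (pvCellB area value k (y - PySem.List.pyGetD area (k:Int) 0) t).2).1 with hrdef
          have hval : r = pvSpec area value (k+1) y := by
            rw [hrdef, h11, h21]
            simp only [pvSpec, if_neg hy, PySem.List.pyGetD_natCast]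
            rw [if_pos haInt]
          rw [pv_write_eq t2 (k+1) y hy0 r]
          have hxk : (k+1:Nat) < t2.length := by rw [hs2.1]; omega
          obtain ⟨hs', hpres, hself⟩ := pv_write_props value cap t2 (k+1) y hy0 hy1 hxk hs2 r
          rw [pv_lookup t (k+1) y hy0] at hmy
          refine ⟨hval, hs', ?_, ?_, by rw [hself, hval]⟩
          · intro i j r' h
            by_cases hc : i = k+1 ∧ j = y.toNat
            · obtain ⟨hc1, hc2⟩ := hc
              subst hc1; subst hc2
              rw [hself] at h
              cases h
              rw [hval]
              congr 1
              omega
            · rw [hpres i j hc] at h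
              exact hi2 i j r' h
          · intro i j hsome
            have e1 := hp1 i j hsome
            have hsome1 : (pvE (pvCellB area value k
                (y - PySem.List.pyGetD area (k:Int) 0) t).2 i j).isSome := by
              rw [e1]; exact hsome
            have e2 := hp2 i j hsome1
            have hnc : ¬ (i = k+1 ∧ j = y.toNat) := by
              rintro ⟨hc1, hc2⟩
              subst hc1; subst hc2
              rw [hmy] at hsome
              simp at hsome
            rw [hpres i j hnc, e2, e1]
        · simp only [pvCellB_skip area value k y t hmy hy ha]
          have haInt : ¬ area.getD k 0 ≤ y := by
            rwa [PySem.List.pyGetD_natCast] at ha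
          obtain ⟨h1, hs1, hi1, hp1, _⟩ := ih (by omega) y t hy0 hy1 hs hi
          set t1 := (pvCellB area value k y t).2 with ht1
          have hval : (pvCellB area value k y t).1 = pvSpec area value (k+1) y := by
            rw [h1]
            simp only [pvSpec, if_neg hy]
            rw [if_neg haInt]
          rw [pv_write_eq t1 (k+1) y hy0 _]
          have hxk : (k+1:Nat) < t1.length := by rw [hs1.1]; omega
          obtain ⟨hs', hpres, hself⟩ :=
            pv_write_props value cap t1 (k+1) y hy0 hy1 hxk hs1 (pvCellB area value k y t).1
          rw [pv_lookup t (k+1) y hy0] at hmy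
          refine ⟨hval, hs', ?_, ?_, by rw [hself, hval]⟩
          · intro i j r' h
            by_cases hc : i = k+1 ∧ j = y.toNat
            · obtain ⟨hc1, hc2⟩ := hc
              subst hc1; subst hc2
              rw [hself] at h
              cases h
              rw [hval]
              congr 1
              omega
            · rw [hpres i j hc] at h
              exact hi1 i j r' h
          · intro i j hsome
            have e1 := hp1 i j hsome
            have hnc : ¬ (i = k+1 ∧ j = y.toNat) := by
              rintro ⟨hc1, hc2⟩
              subst hc1; subst hc2
              rw [hmy] at hsome
              simp at hsome
            rw [hpres i j hnc, e1]

-- the inner y-loop fills row x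
theorem pv_fold_y (area value : List Int) (cap : Int)
    (harea : 0 < cap → ∀ a ∈ area.take value.length, 0 ≤ a)
    (x : Nat) (hx : x ≤ value.length) :
    ∀ (ys : List Int), (∀ y ∈ ys, 0 ≤ y ∧ y < cap + 1) →
      ∀ t, pvShapeB value cap t → pvInvB area value t →
      pvShapeB value cap (ys.foldl (fun t y => (pvCellB area value x y t).2) t)
      ∧ pvInvB area value (ys.foldl (fun t y => (pvCellB area value x y t).2) t)
      ∧ (∀ i j : Nat, (pvE t i j).isSome →
          pvE (ys.foldl (fun t y => (pvCellB area value x y t).2) t) i j = pvE t i j)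
      ∧ (∀ y ∈ ys, pvE (ys.foldl (fun t y => (pvCellB area value x y t).2) t) x y.toNat
          = some (pvSpec area value x y)) := by
  intro ys
  induction ys with
  | nil => intro _ t hs hi; exact ⟨hs, hi, fun _ _ _ => rfl, fun y hy => absurd hy (by simp)⟩
  | cons y rest ihy =>
    intro hys t hs hi
    obtain ⟨hy0, hy1⟩ := hys y (by simp)
    obtain ⟨_, hs1, hi1, hp1, hself⟩ := pv_cell_main area value cap harea x hx y t hy0 hy1 hs hi
    simp only [List.foldl_cons]
    obtain ⟨hs', hi', hp', hfill⟩ :=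
      ihy (fun y hy => hys y (by simp [hy])) (pvCellB area value x y t).2 hs1 hi1
    refine ⟨hs', hi', ?_, ?_⟩
    · intro i j hsome
      rw [hp' i j (by rw [hp1 i j hsome]; exact hsome), hp1 i j hsome]
    · intro y' hy'
      rcases List.mem_cons.mp hy' with hy' | hy'
      · subst hy'
        rw [hp' x y'.toNat (by rw [hself]; rfl), hself]
      · exact hfill y' hy'

-- the outer x-loop fills every row
theorem pv_fold_x (area value : List Int) (cap : Int)
    (harea : 0 < cap → ∀ a ∈ area.take value.length, 0 ≤ a) :
    ∀ (xs : List Nat), (∀ x ∈ xs, x ≤ value.length) →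
      ∀ t, pvShapeB value cap t → pvInvB area value t →
      pvShapeB value cap (xs.foldl (fun t x =>
          (PySem.List.pyRange 0 (cap+1) 1).foldl (fun t y => (pvCellB area value x y t).2) t) t)
      ∧ (∀ i j : Nat, (pvE t i j).isSome →
          pvE (xs.foldl (fun t x =>
            (PySem.List.pyRange 0 (cap+1) 1).foldl (fun t y => (pvCellB area value x y t).2) t) t) i j
            = pvE t i j)
      ∧ (∀ x ∈ xs, ∀ j : Nat, j < (cap+1).toNat →
          pvE (xs.foldl (fun t x =>
            (PySem.List.pyRange 0 (cap+1) 1).foldl (fun t y => (pvCellB area value x y t).2) t) t) x j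
            = some (pvSpec area value x (j:Int))) := by
  intro xs
  induction xs with
  | nil => intro _ t hs hi; exact ⟨hs, fun _ _ _ => rfl, fun x hx => absurd hx (by simp)⟩
  | cons x rest ihx =>
    intro hxs t hs hi
    have hys : ∀ y ∈ PySem.List.pyRange 0 (cap+1) 1, 0 ≤ y ∧ y < cap + 1 := by
      intro y hy
      rw [PySem.List.mem_pyRange_one] at hy
      exact ⟨hy.1, hy.2⟩
    obtain ⟨hs1, hi1, hp1, hfill1⟩ :=
      pv_fold_y area value cap harea x (hxs x (by simp)) (PySem.List.pyRange 0 (cap+1) 1) hys t hs hi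
    simp only [List.foldl_cons]
    obtain ⟨hs', hp', hfill'⟩ := ihx (fun x hx => hxs x (by simp [hx])) _ hs1 hi1
    refine ⟨hs', ?_, ?_⟩
    · intro i j hsome
      rw [hp' i j (by rw [hp1 i j hsome]; exact hsome), hp1 i j hsome]
    · intro x' hx' j hj
      rcases List.mem_cons.mp hx' with hx' | hx'
      · subst hx'
        have hyj : ((j:Int)) ∈ PySem.List.pyRange 0 (cap+1) 1 := by
          rw [PySem.List.mem_pyRange_one]
          omega
        have := hfill1 (j:Int) hyj
        rw [Int.toNat_natCast] at this
        rw [hp' x' j (by rw [this]; rfl), this]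
      · exact hfill' x' hx' j hj

theorem pv_B_eq (area value : List Int) (cap : Int)
    (hPre : Pre_get_memtable area value cap) :
    get_memtable_alt area value cap
      = (List.range (value.length + 1)).map
          (fun x => (PySem.List.pyRange 0 (cap+1) 1).map (pvSpec area value x)) := by
  have harea : 0 < cap → ∀ a ∈ area.take value.length, 0 ≤ a := by
    intro hc
    rcases hPre with h | h
    · omega
    · exact h.2
  have ht0 : (List.range (value.length+1)).map
      (fun _ => PySem.List.pyRepeat [(none : Option Int)] (cap+1))
      = List.replicate (value.length+1) (List.replicate (cap+1).toNat (none : Option Int)) := by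
    rw [List.map_const']
    simp [PySem.List.pyRepeat_singleton]
  have hs0 : pvShapeB value cap (List.replicate (value.length+1)
      (List.replicate (cap+1).toNat (none : Option Int))) := by
    constructor
    · simp
    · intro i hi
      rw [List.length_replicate] at hi
      rw [List.getD_eq_getElem?_getD, List.getElem?_replicate, if_pos hi]
      simp
  have hentry : ∀ i j : Nat, pvE (List.replicate (value.length+1)
      (List.replicate (cap+1).toNat (none : Option Int))) i j = none := by
    intro i j
    simp only [pvE, List.getD_eq_getElem?_getD, List.getElem?_replicate]
    split_ifs <;> simp
  have hi0 : pvInvB area value (List.replicate (value.length+1)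
      (List.replicate (cap+1).toNat (none : Option Int))) := by
    intro i j r h
    rw [hentry i j] at h
    cases h
  have hxs : ∀ x ∈ List.range (value.length+1), x ≤ value.length := by
    intro x hx
    rw [List.mem_range] at hx
    omega
  show ((List.range (value.length+1)).foldl (fun t x =>
      (PySem.List.pyRange 0 (cap+1) 1).foldl (fun t y => (pvCellB area value x y t).2) t)
      ((List.range (value.length+1)).map
        (fun _ => PySem.List.pyRepeat [(none : Option Int)] (cap+1)))).map
      (fun row => row.map (fun o => o.getD 0)) = _
  rw [ht0]
  obtain ⟨hs', _, hfill⟩ := pv_fold_x area value cap harea (List.range (value.length+1)) hxs _ hs0 hi0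
  set T := (List.range (value.length+1)).foldl (fun t x =>
      (PySem.List.pyRange 0 (cap+1) 1).foldl (fun t y => (pvCellB area value x y t).2) t)
      (List.replicate (value.length+1) (List.replicate (cap+1).toNat (none : Option Int))) with hT
  have hTfull : T = (List.range (value.length + 1)).map
      (fun x => (PySem.List.pyRange 0 (cap+1) 1).map (fun y => some (pvSpec area value x y))) := by
    apply List.ext_getElem
    · rw [hs'.1]
      simp
    · intro x h1 h2
      have hxlen : x < value.length + 1 := by rw [← hs'.1]; exact h1
      have hrowlen : (T.getD x []).length = (cap+1).toNat := hs'.2 x h1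
      have hrowget : T[x] = T.getD x [] := by
        rw [List.getD_eq_getElem?_getD, List.getElem?_eq_getElem h1]
        rfl
      rw [List.getElem_map, List.getElem_range, hrowget]
      apply List.ext_getElem
      · rw [hrowlen]
        simp [PySem.List.length_pyRange_one]
      · intro j hj1 hj2
        have hjlen : j < (cap+1).toNat := by omega
        have hE := hfill x (by rw [List.mem_range]; exact hxlen) j hjlen
        unfold pvE at hE
        rw [List.getD_eq_getElem?_getD, List.getElem?_eq_getElem hj1, Option.getD_some] at hE
        rw [hE, List.getElem_map, PySem.List.getElem_pyRange_one]
        simp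
  rw [hTfull, List.map_map]
  apply List.map_congr_left
  intro x _
  simp [Function.comp_def, List.map_map]

-- ---- A-side: the nested index loops compute pvFRows row by row ----

-- the all-zero row both programs start from
def pvZRow (cap : Int) : List Int :=
  (PySem.List.pyRange 0 (cap+1) 1).map (fun _ => (0:Int))

-- the value A's inner loop writes at column y of row x (reads only the previous row `prev`)
def pvCell (area : List Int) (value : List Int) (prev : List Int) (x y : Int) : Int :=
  if x = 0 ∨ y = 0 then 0
  else
    let a := PySem.List.pyGetD area (x-1) 0
    if a ≤ y then
      max (PySem.List.pyGetD value (x-1) 0 + PySem.List.pyGetD prev (y - a) 0)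
          (PySem.List.pyGetD prev y 0)
    else PySem.List.pyGetD prev y 0

-- one DP row from the previous one
def pvFRow (cap a v : Int) (row : List Int) : List Int :=
  (PySem.List.pyRange 0 (cap+1) 1).map (fun y =>
    if y = 0 then 0
    else if a ≤ y then
      max (v + PySem.List.pyGetD row (y - a) 0) (PySem.List.pyGetD row y 0)
    else PySem.List.pyGetD row y 0)

-- the k-th final row of the table
def pvFRows (area : List Int) (value : List Int) (cap : Int) : Nat → List Int
  | 0 => pvZRow cap
  | k+1 => pvFRow cap (area.getD k 0) (value.getD k 0) (pvFRows area value cap k)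

-- filling a whole row position by position is mapping the cell function over the range
theorem pv_rowfold (area value prev : List Int) (cap x : Int) :
    ∀ (m j : Nat) (r : List Int), (cap+1).toNat - j = m → j ≤ (cap+1).toNat →
      r.length = (cap+1).toNat →
      (PySem.List.pyRange (j:Int) (cap+1) 1).foldl
          (fun r y => PySem.List.pySetD r y (pvCell area value prev x y)) r
        = r.take j ++ (PySem.List.pyRange (j:Int) (cap+1) 1).map (pvCell area value prev x) := by
  intro m
  induction m with
  | zero =>
    intro j r hm hj hr
    have hle : cap + 1 ≤ (j:Int) := by omega
    have hlen : r.length ≤ j := by omega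
    rw [PySem.List.pyRange_one_eq_nil hle]
    simp [List.take_of_length_le hlen]
  | succ m ih =>
    intro j r hm hj hr
    have hjlt : (j:Int) < cap + 1 := by omega
    rw [PySem.List.pyRange_one_cons hjlt, List.foldl_cons, List.map_cons]
    have hcast : (j:Int) + 1 = ((j+1 : Nat) : Int) := by push_cast; ring
    rw [hcast]
    rw [PySem.List.pySetD_natCast]
    rw [ih (j+1) (r.set j (pvCell area value prev x (j:Int))) (by omega) (by omega)
        (by simpa using hr)]
    have htake : (r.set j (pvCell area value prev x (j:Int))).take (j+1)
        = r.take j ++ [pvCell area value prev x (j:Int)] := by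
      rw [List.set_eq_take_append_cons_drop, if_pos (by omega), List.take_append]
      simp [List.length_take, Nat.min_eq_left (by omega : j ≤ r.length),
        List.take_of_length_le]
    rw [htake, List.append_assoc]
    rfl

-- the inner y-loop only rewrites row x and reads row x-1, which it never touches
theorem pv_innerfold (area value : List Int) (cap : Int) (T : List (List Int)) (x : Nat)
    (hx : x < T.length) :
    ∀ (m j : Nat) (r : List Int), (cap+1).toNat - j = m →
      (PySem.List.pyRange (j:Int) (cap+1) 1).foldl
          (fun table y => PySem.List.pySetD table (x:Int)
            (PySem.List.pySetD (PySem.List.pyGetD table (x:Int) []) y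
              (pvCell area value (PySem.List.pyGetD table ((x:Int)-1) []) (x:Int) y)))
          (PySem.List.pySetD T (x:Int) r)
        = PySem.List.pySetD T (x:Int)
            ((PySem.List.pyRange (j:Int) (cap+1) 1).foldl
              (fun r y => PySem.List.pySetD r y
                (pvCell area value (PySem.List.pyGetD T ((x:Int)-1) []) (x:Int) y)) r) := by
  intro m
  induction m with
  | zero =>
    intro j r hm
    rw [PySem.List.pyRange_one_eq_nil (by omega)]
    simp
  | succ m ih =>
    intro j r hm
    have hjlt : (j:Int) < cap + 1 := by omega
    rw [PySem.List.pyRange_one_cons hjlt, List.foldl_cons, List.foldl_cons]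
    have hA : PySem.List.pyGetD (PySem.List.pySetD T (x:Int) r) (x:Int) [] = r := by
      rw [PySem.List.pyGetD_pySetD_natCast T x x r [] hx, if_pos rfl]
    have hprev : pvCell area value
          (PySem.List.pyGetD (PySem.List.pySetD T (x:Int) r) ((x:Int)-1) []) (x:Int) (j:Int)
        = pvCell area value (PySem.List.pyGetD T ((x:Int)-1) []) (x:Int) (j:Int) := by
      cases x with
      | zero => simp [pvCell]
      | succ n =>
        have hc : ((n+1 : Nat):Int) - 1 = (n : Int) := by push_cast; ring
        rw [hc, PySem.List.pyGetD_pySetD_natCast T (n+1) n r [] hx, if_neg (by omega)]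
    rw [hA, hprev]
    have hB : PySem.List.pySetD (PySem.List.pySetD T (x:Int) r) (x:Int)
          (PySem.List.pySetD r (j:Int)
            (pvCell area value (PySem.List.pyGetD T ((x:Int)-1) []) (x:Int) (j:Int)))
        = PySem.List.pySetD T (x:Int)
          (PySem.List.pySetD r (j:Int)
            (pvCell area value (PySem.List.pyGetD T ((x:Int)-1) []) (x:Int) (j:Int))) := by
      simp [PySem.List.pySetD_natCast, List.set_set]
    rw [hB]
    have hcast : (j:Int) + 1 = ((j+1 : Nat) : Int) := by push_cast; ring
    rw [hcast]
    exact ih (j+1) _ (by omega)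

-- one pass of the outer loop turns the next all-zero row into the next final row
theorem pv_step (area value : List Int) (cap : Int) (k : Nat) (hk : k ≤ value.length) :
    (PySem.List.pyRange 0 (cap+1) 1).foldl
        (fun table y => PySem.List.pySetD table (k:Int)
          (PySem.List.pySetD (PySem.List.pyGetD table (k:Int) []) y
            (pvCell area value (PySem.List.pyGetD table ((k:Int)-1) []) (k:Int) y)))
        ((List.range k).map (pvFRows area value cap)
          ++ List.replicate (value.length+1-k) (pvZRow cap))
      = (List.range (k+1)).map (pvFRows area value cap)
          ++ List.replicate (value.length-k) (pvZRow cap) := by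
  have hsplit : List.replicate (value.length+1-k) (pvZRow cap)
      = pvZRow cap :: List.replicate (value.length-k) (pvZRow cap) := by
    rw [← List.replicate_succ]
    congr 1
    omega
  rw [hsplit]
  set A := (List.range k).map (pvFRows area value cap) with hAdef
  have hlenA : A.length = k := by simp [hAdef]
  set B := List.replicate (value.length-k) (pvZRow cap) with hBdef
  set T := A ++ pvZRow cap :: B with hTdef
  have hx : k < T.length := by
    simp [hTdef, hlenA]
  have hset : ∀ (row : List Int), PySem.List.pySetD T (k:Int) row = A ++ row :: B := by
    intro row
    rw [PySem.List.pySetD_natCast, hTdef, ← hlenA,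
      List.set_append_right _ _ (Nat.le_refl _)]
    simp
  have hTset : PySem.List.pySetD T (k:Int) (pvZRow cap) = T := by
    rw [hset]
  have hzlen : (pvZRow cap).length = (cap+1).toNat := by
    simp [pvZRow, PySem.List.length_pyRange_one]
  have h2 := pv_innerfold area value cap T k hx ((cap+1).toNat) 0 (pvZRow cap) (by omega)
  simp only [Nat.cast_zero] at h2
  have h1 := pv_rowfold area value (PySem.List.pyGetD T ((k:Int)-1) []) cap (k:Int)
      ((cap+1).toNat) 0 (pvZRow cap) (by omega) (by omega) hzlen
  simp only [Nat.cast_zero] at h1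
  rw [← hTset, h2, h1]
  have hmap : (PySem.List.pyRange 0 (cap+1) 1).map
        (pvCell area value (PySem.List.pyGetD T ((k:Int)-1) []) (k:Int))
      = pvFRows area value cap k := by
    cases k with
    | zero =>
      show _ = pvZRow cap
      unfold pvZRow
      apply List.map_congr_left
      intro y _
      simp [pvCell]
    | succ k' =>
      have hc2 : ((k'+1 : Nat):Int) - 1 = (k' : Int) := by push_cast; ring
      have hprev : PySem.List.pyGetD T (((k'+1 : Nat):Int) - 1) []
          = pvFRows area value cap k' := by
        rw [hc2, PySem.List.pyGetD_natCast, List.getD_eq_getElem?_getD, hTdef,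
          List.getElem?_append_left (by omega), hAdef, List.getElem?_map]
        simp
      rw [hprev]
      show _ = pvFRow cap (area.getD k' 0) (value.getD k' 0) (pvFRows area value cap k')
      unfold pvFRow
      apply List.map_congr_left
      intro y _
      simp only [pvCell, hc2, PySem.List.pyGetD_natCast]
      by_cases hy0 : y = 0
      · simp [hy0]
      · simp [hy0, show ((k':Int)+1) ≠ 0 by omega]
  rw [hmap, hset]
  rw [List.range_succ, List.map_append, List.append_assoc]
  rfl

-- after the first k outer iterations: k final rows, the rest still zero
theorem pv_outer (area value : List Int) (cap : Int) :
    ∀ (k : Nat), k ≤ value.length + 1 →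
      (PySem.List.pyRange 0 (k:Int) 1).foldl
          (fun table x =>
            (PySem.List.pyRange 0 (cap+1) 1).foldl
              (fun table y => PySem.List.pySetD table x
                (PySem.List.pySetD (PySem.List.pyGetD table x []) y
                  (pvCell area value (PySem.List.pyGetD table (x-1) []) x y)))
              table)
          (List.replicate (value.length+1) (pvZRow cap))
        = (List.range k).map (pvFRows area value cap)
            ++ List.replicate (value.length+1-k) (pvZRow cap) := by
  intro k
  induction k with
  | zero =>
    intro _
    rw [show ((0:Nat):Int) = (0:Int) by simp, PySem.List.pyRange_one_eq_nil (le_refl 0)]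
    simp
  | succ k ih =>
    intro hk1
    have hk : k ≤ value.length := by omega
    rw [show ((k+1:Nat):Int) = (k:Int) + 1 by push_cast; ring,
      show PySem.List.pyRange 0 ((k:Int)+1) 1 = PySem.List.pyRange 0 (k:Int) 1 ++ [(k:Int)]
        from PySem.List.pyRange_one_succ_right (Int.natCast_nonneg k),
      List.foldl_append, ih (by omega), List.foldl_cons, List.foldl_nil,
      show value.length + 1 - (k+1) = value.length - k from by omega]
    exact pv_step area value cap k hk

theorem pv_A_eq (area value : List Int) (cap : Int) :
    get_memtable area value cap
      = (List.range (value.length + 1)).map (pvFRows area value cap) := by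
  show (PySem.List.pyRange 0 ((PySem.List.len value)+1) 1).foldl
      (fun table x => (PySem.List.pyRange 0 (cap+1) 1).foldl
        (fun table y => PySem.List.pySetD table x
          (PySem.List.pySetD (PySem.List.pyGetD table x []) y
            (pvCell area value (PySem.List.pyGetD table (x-1) []) x y))) table)
      ((PySem.List.pyRange 0 ((PySem.List.len value)+1) 1).map (fun _ =>
        (PySem.List.pyRange 0 (cap+1) 1).map (fun _ => (0:Int)))) = _
  have hlen : PySem.List.len value + 1 = ((value.length + 1 : Nat) : Int) := by
    rw [PySem.List.len_eq]
    push_cast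
    ring
  rw [hlen]
  have htab : (PySem.List.pyRange 0 ((value.length+1:Nat):Int) 1).map
        (fun _ => (PySem.List.pyRange 0 (cap+1) 1).map (fun _ => (0:Int)))
      = List.replicate (value.length+1) (pvZRow cap) := by
    rw [List.map_const']
    congr 1
    simp [PySem.List.length_pyRange_one]
  rw [htab, pv_outer area value cap (value.length+1) (le_refl _)]
  simp

-- ---- bridge: under Pre_, the final rows are the spec values ----
theorem pv_bridge (area value : List Int) (cap : Int)
    (hPre : Pre_get_memtable area value cap) :
    ∀ (k : Nat), k ≤ value.length →
      pvFRows area value cap k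
        = (PySem.List.pyRange 0 (cap+1) 1).map (pvSpec area value k) := by
  intro k
  induction k with
  | zero =>
    intro _
    show pvZRow cap = _
    unfold pvZRow
    apply List.map_congr_left
    intro y _
    rfl
  | succ k ih =>
    intro hk
    have ihr := ih (by omega)
    show pvFRow cap (area.getD k 0) (value.getD k 0) (pvFRows area value cap k) = _
    unfold pvFRow
    apply List.map_congr_left
    intro y hy
    rw [PySem.List.mem_pyRange_one] at hy
    by_cases hy0 : y = 0
    · simp [hy0, pvSpec]
    · -- y ≥ 1 forces capacity ≥ 1, so Pre_'s second disjunct holds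
      have hcap : 1 ≤ cap := by omega
      have harea : value.length ≤ area.length ∧ ∀ a ∈ area.take value.length, 0 ≤ a := by
        rcases hPre with h | h
        · omega
        · exact h
      have ha0 : 0 ≤ area.getD k 0 := by
        by_cases hkl : k < area.length
        · refine harea.2 _ ?_
          rw [List.getD_eq_getElem?_getD, List.getElem?_eq_getElem hkl]
          exact List.mem_take_iff_getElem.mpr ⟨k, by omega, by simp⟩
        · rw [List.getD_eq_getElem?_getD, List.getElem?_eq_none (by omega)]; rfl
      have hget : ∀ (z : Int), 0 ≤ z → z < cap + 1 →
          PySem.List.pyGetD (pvFRows area value cap k) z 0 = pvSpec area value k z := by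
        intro z hz1 hz2
        rw [ihr]
        exact PySem.List.pyGetD_map_pyRange_of_nonneg _ _ _ _ hz1 hz2
      show (if y = 0 then 0
        else if area.getD k 0 ≤ y then
          max (value.getD k 0 + PySem.List.pyGetD (pvFRows area value cap k) (y - area.getD k 0) 0)
              (PySem.List.pyGetD (pvFRows area value cap k) y 0)
        else PySem.List.pyGetD (pvFRows area value cap k) y 0) = pvSpec area value (k+1) y
      rw [if_neg hy0]
      show _ = (if y = 0 then 0
        else if area.getD k 0 ≤ y then
          max (value.getD k 0 + pvSpec area value k (y - area.getD k 0)) (pvSpec area value k y)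
        else pvSpec area value k y)
      rw [if_neg hy0]
      by_cases hay : area.getD k 0 ≤ y
      · rw [if_pos hay, if_pos hay,
          hget (y - area.getD k 0) (by omega) (by omega),
          hget y (by omega) (by omega)]
      · rw [if_neg hay, if_neg hay, hget y (by omega) (by omega)]

-- ===== VERDICT (by name: the statement is the Claim_ definition above) =====
theorem get_memtable_spec : Claim_equal_get_memtable := by
  intro area value capacity _ hPre
  unfold Spec_get_memtable
  rw [pv_A_eq, pv_B_eq area value capacity hPre]
  apply List.map_congr_left
  intro k hk
  rw [List.mem_range] at hk
  exact pv_bridge area value capacity hPre k (by omega)
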